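-- pv_equiv track=rewrite | github.com/acud/py-swarm | src/kademlia/kad.py | distancecmp
-- ===== SOURCE A (Python) =====
-- def distancecmp(a,x,y):
--     for i in range(len(a)):
--         dx = x[i] ^ a[i]
--         dy = y[i] ^ a[i]
--         if dx == dy:
--             continue
--         elif dx < dy:
--             return 1
--         return -1
--     return 0
-- ===== SOURCE B (Python) =====
-- def distancecmp(a, x, y):
--     dx = [xi ^ ai for xi, ai in zip(x, a)]
--     dy = [yi ^ ai for yi, ai in zip(y, a)]
--     return (dx < dy) - (dx > dy)
-- ===== Notes on version B (the rewrite author's own statement) =====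
-- stated objective: simpler
-- what changed: B builds the two XOR distance tables in one zip pass each and decides with a single lexicographic list comparison (dx<dy)-(dx>dy), replacing A's indexed early-exit per-element branching loop.
import Mathlib
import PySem

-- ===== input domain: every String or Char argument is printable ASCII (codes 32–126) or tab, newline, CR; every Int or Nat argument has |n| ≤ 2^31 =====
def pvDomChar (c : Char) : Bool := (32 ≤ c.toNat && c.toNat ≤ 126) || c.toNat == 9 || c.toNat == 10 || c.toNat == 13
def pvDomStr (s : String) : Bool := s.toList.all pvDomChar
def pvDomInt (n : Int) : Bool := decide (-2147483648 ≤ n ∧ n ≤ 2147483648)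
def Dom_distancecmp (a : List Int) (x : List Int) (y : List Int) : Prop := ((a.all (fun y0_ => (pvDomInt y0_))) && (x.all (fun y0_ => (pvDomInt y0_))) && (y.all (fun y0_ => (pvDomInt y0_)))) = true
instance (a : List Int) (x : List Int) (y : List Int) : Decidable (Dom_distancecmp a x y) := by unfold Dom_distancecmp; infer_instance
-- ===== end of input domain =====

-- B replaces A's indexed early-exit loop by two zip-built XOR distance tables and one
-- lexicographic list comparison (objective: simpler).


-- ===== PORT A =====
-- loop 'for i in range(len(a))' with early returns; under Pre_ every x[i]/y[i] access is
-- in range, so List.getD is exact there.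
def distancecmpGo (a x y : List Int) (i : Nat) : Int :=
  if _h : i < a.length then
    let dx := PySem.Int.bxor (x.getD i 0) (a.getD i 0)
    let dy := PySem.Int.bxor (y.getD i 0) (a.getD i 0)
    if dx = dy then distancecmpGo a x y (i + 1)
    else if dx < dy then 1
    else -1
  else 0
termination_by a.length - i

def distancecmp (a : List Int) (x : List Int) (y : List Int) : Int :=
  distancecmpGo a x y 0

-- ===== PORT B =====
-- Python's lexicographic list '<' on List Int
def pyListLt : List Int → List Int → Bool
  | _, [] => false
  | [], _ :: _ => true
  | p :: ps, q :: qs => if p < q then true else if q < p then false else pyListLt ps qs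

def distancecmp_alt (a : List Int) (x : List Int) (y : List Int) : Int :=
  let dx := (x.zip a).map (fun p => PySem.Int.bxor p.1 p.2)
  let dy := (y.zip a).map (fun p => PySem.Int.bxor p.1 p.2)
  (if pyListLt dx dy then 1 else 0) - (if pyListLt dy dx then 1 else 0)

-- ===== PRECONDITION & SPEC =====
-- Pre_ holds exactly where Python A returns: either x and y are at least as long as a, or
-- some index below min(len x, len y) already decides (so the loop exits before the
-- out-of-range access that makes A raise IndexError).
def Pre_distancecmp (a : List Int) (x : List Int) (y : List Int) : Prop :=
  a.length ≤ min x.length y.length ∨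
    ∃ j, j < min x.length y.length ∧
      PySem.Int.bxor (x.getD j 0) (a.getD j 0) ≠ PySem.Int.bxor (y.getD j 0) (a.getD j 0)
instance (a : List Int) (x : List Int) (y : List Int) : Decidable (Pre_distancecmp a x y) := by
  unfold Pre_distancecmp; infer_instance

def pvWitness_distancecmp : List Int × List Int × List Int := ([1], [2], [3])

def Spec_distancecmp (a : List Int) (x : List Int) (y : List Int) (out : Int) : Prop :=
  out = distancecmp_alt a x y
instance (a : List Int) (x : List Int) (y : List Int) (out : Int) :
    Decidable (Spec_distancecmp a x y out) := by unfold Spec_distancecmp; infer_instance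

-- ===== CLAIM (what is proved, stated in full; the proofs are below) =====
def Claim_equal_distancecmp : Prop := ∀ (a : List Int) (x : List Int) (y : List Int),
  Dom_distancecmp a x y → Pre_distancecmp a x y → Spec_distancecmp a x y (distancecmp a x y)

-- ===== LEMMAS AND PROOFS =====

lemma pyCmp_cons (p q : Int) (ps qs : List Int) :
    ((if pyListLt (p::ps) (q::qs) then (1:Int) else 0) - (if pyListLt (q::qs) (p::ps) then 1 else 0))
    = if p = q then ((if pyListLt ps qs then (1:Int) else 0) - (if pyListLt qs ps then 1 else 0))
      else if p < q then 1 else -1 := by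
  by_cases h : p = q
  · subst h; simp [pyListLt]
  · by_cases hlt : p < q
    · simp [pyListLt, h, hlt, asymm hlt]
    · have hgt : q < p := lt_of_le_of_ne (not_lt.mp hlt) (Ne.symm h)
      simp [pyListLt, h, hlt, hgt]

lemma distancecmpGo_eq (a x y : List Int) :
    ∀ (n i : Nat), a.length - i = n → i ≤ a.length →
    (a.length ≤ min x.length y.length ∨
      ∃ j, j < min x.length y.length ∧
        PySem.Int.bxor (x.getD j 0) (a.getD j 0) ≠ PySem.Int.bxor (y.getD j 0) (a.getD j 0)) →
    (∀ j, j < i →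
      PySem.Int.bxor (x.getD j 0) (a.getD j 0) = PySem.Int.bxor (y.getD j 0) (a.getD j 0)) →
    distancecmpGo a x y i =
      (if pyListLt (((x.zip a).map (fun p => PySem.Int.bxor p.1 p.2)).drop i)
                   (((y.zip a).map (fun p => PySem.Int.bxor p.1 p.2)).drop i) then 1 else 0)
      - (if pyListLt (((y.zip a).map (fun p => PySem.Int.bxor p.1 p.2)).drop i)
                     (((x.zip a).map (fun p => PySem.Int.bxor p.1 p.2)).drop i) then 1 else 0) := by
  intro n
  induction n with
  | zero =>
    intro i h0 hle _ _
    have hi : i = a.length := by omega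
    subst hi
    have hx : (((x.zip a).map (fun p => PySem.Int.bxor p.1 p.2)).drop a.length) = [] := by
      apply List.drop_eq_nil_of_le; simp
    have hy : (((y.zip a).map (fun p => PySem.Int.bxor p.1 p.2)).drop a.length) = [] := by
      apply List.drop_eq_nil_of_le; simp
    rw [distancecmpGo, hx, hy]
    simp [pyListLt]
  | succ n ih =>
    intro i h0 hle hpre hprefix
    have hia : i < a.length := by omega
    have hstep1 : a.length - (i + 1) = n := by clear hpre hprefix; omega
    have hstep2 : i + 1 ≤ a.length := by clear hpre hprefix; omega
    by_cases hm : i < min x.length y.length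
    · have hix : i < x.length := by omega
      have hiy : i < y.length := by omega
      have hxl : i < ((x.zip a).map (fun p => PySem.Int.bxor p.1 p.2)).length := by
        simp; omega
      have hyl : i < ((y.zip a).map (fun p => PySem.Int.bxor p.1 p.2)).length := by
        simp; omega
      have hdx : (((x.zip a).map (fun p => PySem.Int.bxor p.1 p.2)).drop i)
          = PySem.Int.bxor (x.getD i 0) (a.getD i 0)
            :: (((x.zip a).map (fun p => PySem.Int.bxor p.1 p.2)).drop (i+1)) := by
        rw [List.drop_eq_getElem_cons hxl]
        congr 1
        simp [List.getElem_zip, List.getD, List.getElem?_eq_getElem hix,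
          List.getElem?_eq_getElem hia]
      have hdy : (((y.zip a).map (fun p => PySem.Int.bxor p.1 p.2)).drop i)
          = PySem.Int.bxor (y.getD i 0) (a.getD i 0)
            :: (((y.zip a).map (fun p => PySem.Int.bxor p.1 p.2)).drop (i+1)) := by
        rw [List.drop_eq_getElem_cons hyl]
        congr 1
        simp [List.getElem_zip, List.getD, List.getElem?_eq_getElem hiy,
          List.getElem?_eq_getElem hia]
      rw [distancecmpGo, dif_pos hia, hdx, hdy, pyCmp_cons]
      by_cases heq : PySem.Int.bxor (x.getD i 0) (a.getD i 0)
                   = PySem.Int.bxor (y.getD i 0) (a.getD i 0)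
      · rw [if_pos heq, if_pos heq]
        exact ih (i+1) hstep1 hstep2 hpre
          (by intro j hj
              rcases Nat.lt_succ_iff_lt_or_eq.mp hj with h | h
              · exact hprefix j h
              · subst h; exact heq)
      · rw [if_neg heq, if_neg heq]
    · exfalso
      rcases hpre with h | ⟨j, hj, hne⟩
      · omega
      · exact hne (hprefix j (by omega))

theorem distancecmp_spec : Claim_equal_distancecmp := by
  intro a x y _ hpre
  unfold Pre_distancecmp at hpre
  unfold Spec_distancecmp distancecmp distancecmp_alt
  simpa using distancecmpGo_eq a x y a.length 0 rfl (Nat.zero_le _) hpre (by omega)
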